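-- pv_equiv track=rewrite | github.com/HuyaneMatsu/scarletio | scarletio/web_common/content_type.py | _consume_whitespace
-- ===== SOURCE A (Python) =====
-- def _consume_whitespace(string, index, end):
--     """
--     Consumes all white space (and horizontal tabulator) till hits end of string or any other character.
--
--     Parameters
--     ----------
--     string : `str`
--         The string to parse.
--
--     index : `int`
--         The index where to start the parsing.
--
--     end : `int`
--         The end where to stop parsing.
--
--     Returns
--     -------
--     index : `int`
--     """
--     while True:
--         if index >= end:
--             break
--
--         character = string[index]
--         if character not in ' \t':
--             break
--
--         index += 1
--         continue
--
--     return index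
-- ===== SOURCE B (Python) =====
-- def _consume_whitespace(string, index, end):
--     """Slice-and-measure: strip the leading ' \t' run from string[index:end] once
--     and recover the new index as end minus the stripped tail's length."""
--     if index >= end:
--         return index
--     return end - len(string[index:end].lstrip(' \t'))
-- ===== Notes on version B (the rewrite author's own statement) =====
-- stated objective: idiomatic
-- what changed: Replaces the explicit char-by-char while-loop with a single slice plus str.lstrip(' \t') and a length subtraction.
-- outside the precondition, e.g. on _consume_whitespace('ab', -1, 1): A returns -1, B returns 1; on _consume_whitespace('a', 0, 5): A returns 0, B returns 4
import Mathlib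
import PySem

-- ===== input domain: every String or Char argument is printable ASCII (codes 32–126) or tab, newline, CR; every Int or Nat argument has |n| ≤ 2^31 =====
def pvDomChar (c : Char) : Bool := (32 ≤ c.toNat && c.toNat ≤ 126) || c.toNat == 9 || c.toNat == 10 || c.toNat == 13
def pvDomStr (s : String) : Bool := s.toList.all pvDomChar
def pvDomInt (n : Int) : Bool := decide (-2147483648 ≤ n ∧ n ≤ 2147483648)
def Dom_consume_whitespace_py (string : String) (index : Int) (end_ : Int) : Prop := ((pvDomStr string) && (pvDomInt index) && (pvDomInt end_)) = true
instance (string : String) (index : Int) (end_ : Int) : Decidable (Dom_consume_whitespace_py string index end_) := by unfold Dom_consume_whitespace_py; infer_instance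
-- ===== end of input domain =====

-- B replaces A's char-by-char while-loop with a single slice + lstrip(' \t') and a length
-- subtraction (idiomatic, same cost). Pre_ excludes ranges reaching outside the string
-- (negative index or end beyond the length), where A's direct indexing raises or its
-- return value is an artefact of Python's index wraparound / slice clamping.


-- ===== PORT A =====
-- the while-loop of A: break when index >= end, read string[index] (none = IndexError,
-- excluded by Pre_; the loop then stops with the current index), break on a
-- non-' '/'\t' character, else index += 1
def pvLoopA (cs : List Char) (index : Int) (end_ : Int) : Int :=
  if _h : index ≥ end_ then index
  else
    match PySem.List.pyGet? cs index with
    | none => index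
    | some c =>
      if ¬ (c == ' ' || c == '\t') then index
      else pvLoopA cs (index + 1) end_
termination_by (end_ - index).toNat
decreasing_by simp at _h; omega

def consume_whitespace_py (string : String) (index : Int) (end_ : Int) : Int :=
  pvLoopA string.toList index end_

-- ===== PORT B =====
-- Source B: if index >= end: return index; return end - len(string[index:end].lstrip(' \t'))
-- lstrip(' \t') is ported by hand as dropWhile over the characters (exact: lstrip with an
-- explicit char set drops exactly the leading characters belonging to that set)
def consume_whitespace_py_alt (string : String) (index : Int) (end_ : Int) : Int :=
  if index ≥ end_ then index
  else
    end_ - ((PySem.List.slice string.toList (some index) (some end_)).dropWhile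
              (fun c => c == ' ' || c == '\t')).length

-- ===== PRECONDITION & SPEC =====
-- Pre_ excludes index/end ranges reaching outside the string while index < end: there A
-- either raises IndexError or returns a value shaped by negative-index wraparound /
-- slice clamping (see cites), an artefact no caller relies on.
def Pre_consume_whitespace_py (string : String) (index : Int) (end_ : Int) : Prop :=
  index ≥ end_ ∨ (0 ≤ index ∧ end_ ≤ (string.toList.length : Int))
instance (string : String) (index : Int) (end_ : Int) : Decidable (Pre_consume_whitespace_py string index end_) := by unfold Pre_consume_whitespace_py; infer_instance

def pvWitness_consume_whitespace_py : String × Int × Int := ("  a", 0, 3)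

def Spec_consume_whitespace_py (string : String) (index : Int) (end_ : Int) (out : Int) : Prop := out = consume_whitespace_py_alt string index end_
instance (string : String) (index : Int) (end_ : Int) (out : Int) : Decidable (Spec_consume_whitespace_py string index end_ out) := by unfold Spec_consume_whitespace_py; infer_instance

-- ===== CLAIM (what is proved, stated in full; the proofs are below) =====
def Claim_equal_consume_whitespace_py : Prop := ∀ (string : String) (index : Int) (end_ : Int), Dom_consume_whitespace_py string index end_ → Pre_consume_whitespace_py string index end_ → Spec_consume_whitespace_py string index end_ (consume_whitespace_py string index end_)

-- ===== LEMMAS AND PROOFS =====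

-- main invariant: inside the valid range, A's loop lands exactly where B's
-- slice-and-dropWhile computation points
lemma pvLoopA_eq_drop (cs : List Char) (end_ : Int) (hend : end_ ≤ (cs.length : Int)) :
    ∀ (n : ℕ) (index : Int), 0 ≤ index → index ≤ end_ → (end_ - index).toNat = n →
      pvLoopA cs index end_ =
        end_ - ((PySem.List.slice cs (some index) (some end_)).dropWhile
                  (fun c => c == ' ' || c == '\t')).length := by
  intro n
  induction n with
  | zero =>
    intro index h0 hle hn
    have hix : index = end_ := by omega
    subst hix
    rw [pvLoopA]
    simp [PySem.List.slice_toNat cs h0 h0]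
  | succ n ih =>
    intro index h0 hle hn
    have hlt : index < end_ := by omega
    have hidx : index.toNat < cs.length := by omega
    have hslice : PySem.List.slice cs (some index) (some end_)
        = cs[index.toNat] :: PySem.List.slice cs (some (index + 1)) (some end_) := by
      rw [PySem.List.slice_toNat cs h0 (by omega), PySem.List.slice_toNat cs (by omega) (by omega)]
      rw [List.drop_eq_getElem_cons hidx]
      have h1 : (end_).toNat - index.toNat = ((end_).toNat - (index + 1).toNat) + 1 := by omega
      have h2 : index.toNat + 1 = (index + 1).toNat := by omega
      rw [h1, List.take_succ_cons, h2]
    have hget : PySem.List.pyGet? cs index = some cs[index.toNat] :=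
      PySem.List.pyGet?_eq_some_getElem cs h0 (by omega)
    rw [pvLoopA]
    simp only [hget, hslice, ge_iff_le, not_le.mpr hlt, dite_false]
    by_cases hws : (cs[index.toNat] == ' ' || cs[index.toNat] == '\t') = true
    · simp only [hws, not_true_eq_false, if_false, List.dropWhile_cons]
      exact ih (index + 1) (by omega) (by omega) (by omega)
    · rw [if_pos hws, List.dropWhile_cons, if_neg hws]
      have hlen : (PySem.List.slice cs (some (index + 1)) (some end_)).length
          = end_.toNat - (index + 1).toNat := by
        rw [PySem.List.slice_toNat cs (by omega) (by omega)]
        simp only [List.length_take, List.length_drop]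
        omega
      simp only [List.length_cons, hlen]
      omega

-- ===== VERDICT (by name: the statement is the Claim_ definition above) =====
theorem consume_whitespace_py_spec : Claim_equal_consume_whitespace_py := by
  intro s index end_ _hdom hpre
  unfold Spec_consume_whitespace_py consume_whitespace_py consume_whitespace_py_alt
  by_cases hge : index ≥ end_
  · rw [pvLoopA]
    simp [hge]
  · rcases hpre with h | ⟨h0, hend⟩
    · omega
    · rw [if_neg hge]
      exact pvLoopA_eq_drop s.toList end_ hend (end_ - index).toNat index h0 (by omega) rfl
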